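-- pv_equiv track=rewrite | github.com/saleh-ato/programming-challenges | 3.sticky-keys-typing/app.py | isLongPressed
-- ===== SOURCE A (Python) =====
-- def isLongPressed(original: str, typed: str) -> bool:
--     i = 0  # Pointer for original word
--     j = 0  # Pointer for typed word
--
--     while j < len(typed):  # Loop through each character in 'typed'
--         if i < len(original) and original[i] == typed[j]:
--             # If characters match, move to the next one in both strings
--             i += 1
--         elif j > 0 and typed[j] == typed[j - 1]:
--             # If 'typed' character repeats the previous character, allow it
--             pass
--         else:
--             # If neither condition is met, it's not a valid long press
--             return False
--         j += 1  # Move to the next character in 'typed'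
--
--     return i == len(original)  # Ensure we processed all of 'original'
-- ===== SOURCE B (Python) =====
-- def isLongPressed(original: str, typed: str) -> bool:
--     def rle(s):
--         groups = []
--         i = 0
--         n = len(s)
--         while i < n:
--             j = i
--             while j < n and s[j] == s[i]:
--                 j += 1
--             groups.append((s[i], j - i))
--             i = j
--         return groups
--
--     go = rle(original)
--     gt = rle(typed)
--     if len(go) != len(gt):
--         return False
--     return all(c1 == c2 and k2 >= k1 for (c1, k1), (c2, k2) in zip(go, gt))
-- ===== Notes on version B (the rewrite author's own statement) =====
-- stated objective: alternative
-- what changed: Replaces the interleaved two-pointer per-character scan with a group-then-compare decomposition: run-length encode both strings, then require equally many groups with identical characters and typed run length >= original run length.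
import Mathlib
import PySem

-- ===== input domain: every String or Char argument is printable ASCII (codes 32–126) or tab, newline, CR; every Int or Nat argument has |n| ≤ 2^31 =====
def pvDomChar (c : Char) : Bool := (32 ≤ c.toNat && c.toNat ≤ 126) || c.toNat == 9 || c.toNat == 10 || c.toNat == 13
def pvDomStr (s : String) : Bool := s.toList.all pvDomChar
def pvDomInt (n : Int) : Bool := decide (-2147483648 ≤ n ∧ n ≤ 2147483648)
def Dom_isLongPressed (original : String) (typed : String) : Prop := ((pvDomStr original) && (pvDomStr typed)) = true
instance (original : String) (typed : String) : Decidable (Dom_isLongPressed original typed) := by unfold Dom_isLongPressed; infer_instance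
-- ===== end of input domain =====

-- B replaces A's two-pointer scan with run-length encode both strings then compare group lists; same behaviour, no speed claim.

-- ===== PORT A =====
-- the while loop over j with state i; recursion on typed.length - j
def pvLoopA (o t : List Char) (i j : Nat) : Bool :=
  if _h : j < t.length then
    if i < o.length ∧ o[i]? = t[j]? then
      pvLoopA o t (i + 1) (j + 1)
    else if 0 < j ∧ t[j]? = t[j - 1]? then
      pvLoopA o t i (j + 1)
    else
      false
  else
    decide (i = o.length)
termination_by t.length - j

def isLongPressed (original : String) (typed : String) : Bool :=
  pvLoopA original.toList typed.toList 0 0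

-- ===== PORT B =====
-- run-length encoding: scan s taking maximal runs of equal characters
def pvRle (s : List Char) : List (Char × Nat) :=
  match s with
  | [] => []
  | c :: cs =>
      (c, 1 + (cs.takeWhile (· = c)).length) :: pvRle (cs.dropWhile (· = c))
termination_by s.length
decreasing_by
  simp only [List.length_cons]
  exact Nat.lt_succ_of_le (List.length_dropWhile_le _ _)

-- length check + all over zip (B's final comparison)
def pvCheck (go gt : List (Char × Nat)) : Bool :=
  if go.length ≠ gt.length then false
  else (go.zip gt).all (fun p => p.1.1 == p.2.1 && p.1.2 ≤ p.2.2)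

def isLongPressed_alt (original : String) (typed : String) : Bool :=
  pvCheck (pvRle original.toList) (pvRle typed.toList)

-- ===== PRECONDITION & SPEC =====
def Spec_isLongPressed (original : String) (typed : String) (out : Bool) : Prop := out = isLongPressed_alt original typed
instance (original : String) (typed : String) (out : Bool) : Decidable (Spec_isLongPressed original typed out) := by unfold Spec_isLongPressed; infer_instance

-- ===== CLAIM (what is proved, stated in full; the proofs are below) =====
def Claim_equal_isLongPressed : Prop := ∀ (original : String) (typed : String), Dom_isLongPressed original typed → Spec_isLongPressed original typed (isLongPressed original typed)

-- ===== LEMMAS AND PROOFS =====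

-- list-level restatement of A's loop (proof helper)
def pvListA (o t : List Char) (prev : Option Char) : Bool :=
  match t with
  | [] => decide (o = [])
  | d :: ds =>
      match o with
      | c :: cs =>
          if c = d then pvListA cs ds (some d)
          else if prev = some d then pvListA o ds (some d) else false
      | [] => if prev = some d then pvListA [] ds (some d) else false

-- run-based recursion, intermediate between pvListA and pvRle comparison
def pvRunCheck (o t : List Char) : Bool :=
  match t with
  | [] => decide (o = [])
  | d :: ds =>
      match o with
      | [] => false
      | c :: cs =>
          if c = d then
            if 1 + (ds.takeWhile (· = d)).length < 1 + (cs.takeWhile (· = c)).length then false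
            else pvRunCheck (cs.dropWhile (· = c)) (ds.dropWhile (· = d))
          else false
termination_by t.length
decreasing_by
  simp only [List.length_cons]
  exact Nat.lt_succ_of_le (List.length_dropWhile_le _ _)

theorem pv_head_dropWhile (p : Char → Bool) (l : List Char) (a : Char)
    (h : (l.dropWhile p).head? = some a) : p a = false := by
  induction l with
  | nil => simp [List.dropWhile] at h
  | cons x xs ih =>
      by_cases hx : p x
      · simp [List.dropWhile, hx] at h; exact ih h
      · simp [List.dropWhile, hx] at h
        subst h; simpa using hx

theorem pv_takeWhile_eq_replicate (c : Char) (l : List Char) :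
    l.takeWhile (· = c) = List.replicate (l.takeWhile (· = c)).length c := by
  apply List.eq_replicate_of_mem
  intro b hb
  have := List.mem_takeWhile_imp (l := l) (p := (· = c)) hb
  exact of_decide_eq_true this

theorem pv_run_decomp (c : Char) (cs : List Char) :
    c :: cs = List.replicate (1 + (cs.takeWhile (· = c)).length) c ++ cs.dropWhile (· = c) := by
  have h := List.takeWhile_append_dropWhile (p := (· = c)) (l := cs)
  calc c :: cs = c :: (cs.takeWhile (· = c) ++ cs.dropWhile (· = c)) := by rw [h]
    _ = _ := by
        rw [pv_takeWhile_eq_replicate c cs]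
        simp [List.replicate, List.replicate_add]

-- pvListA consumes extra repeated typed chars via prev when the original side is past the run
theorem pvListA_skip (c : Char) (m : Nat) (o t : List Char)
    (ho : o.head? ≠ some c) :
    pvListA o (List.replicate m c ++ t) (some c) = pvListA o t (some c) := by
  induction m with
  | zero => simp
  | succ m ih =>
      rw [List.replicate_succ, List.cons_append]
      cases o with
      | nil => simp [pvListA, ih]
      | cons a as =>
          have hac : ¬ a = c := by simpa using ho
          simp [pvListA, hac, ih]

-- consuming one matching run
theorem pvListA_run (c : Char) (k1 k2 : Nat) (o t : List Char) (prev : Option Char)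
    (ho : o.head? ≠ some c) (ht : t.head? ≠ some c) (h1 : 1 ≤ k1) (h2 : 1 ≤ k2) :
    pvListA (List.replicate k1 c ++ o) (List.replicate k2 c ++ t) prev
      = if k2 < k1 then false else pvListA o t (some c) := by
  induction k2 generalizing k1 prev with
  | zero => omega
  | succ k2 ih =>
      obtain ⟨k1', rfl⟩ : ∃ k1', k1 = k1' + 1 := ⟨k1 - 1, by omega⟩
      rw [List.replicate_succ (n := k2), List.replicate_succ (n := k1'), List.cons_append,
        List.cons_append]
      simp only [pvListA, reduceIte]
      cases Nat.eq_zero_or_pos k1' with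
      | inl h0 =>
          subst h0
          simp only [List.replicate_zero, List.nil_append]
          cases Nat.eq_zero_or_pos k2 with
          | inl h0' => subst h0'; simp
          | inr hpos =>
              rw [pvListA_skip c k2 o t ho]
              simp
      | inr hpos =>
          cases Nat.eq_zero_or_pos k2 with
          | inl h0' =>
              subst h0'
              simp only [List.replicate_zero, List.nil_append]
              -- typed exhausted this run but original run remains: must be false
              have : pvListA (List.replicate k1' c ++ o) t (some c) = false := by
                cases t with
                | nil =>
                    have : List.replicate k1' c ++ o ≠ [] := by
                      cases k1' with
                      | zero => omega
                      | succ n => simp [List.replicate_succ]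
                    simp [pvListA, this]
                | cons d ds =>
                    have hdc : ¬ d = c := by simpa using ht
                    obtain ⟨n, rfl⟩ : ∃ n, k1' = n + 1 := ⟨k1' - 1, by omega⟩
                    rw [List.replicate_succ, List.cons_append]
                    have : ¬ c = d := fun h => hdc h.symm
                    simp only [pvListA, if_neg this]
                    have : ¬ (some c = some d) := by simpa using this
                    simp [this]
              rw [this]
              simp [show 0 + 1 < k1' + 1 from by omega]
          | inr hpos' =>
              rw [ih k1' (some c) hpos hpos']
              by_cases h : k2 < k1'
              · simp [h, show k2 + 1 < k1' + 1 from by omega]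
              · simp [h, show ¬ (k2 + 1 < k1' + 1) from by omega]

theorem pvListA_eq_runCheck (t o : List Char) (prev : Option Char)
    (hsafe : ∀ d, t.head? = some d → prev ≠ some d) :
    pvListA o t prev = pvRunCheck o t := by
  match t with
  | [] => simp [pvListA, pvRunCheck]
  | d :: ds =>
    match o with
    | [] =>
        have h1 : prev ≠ some d := hsafe d rfl
        simp [pvListA, pvRunCheck, h1]
    | c :: cs =>
        by_cases hcd : c = d
        · subst hcd
          have ho' : (cs.dropWhile (· = c)).head? ≠ some c := by
            intro h; have := pv_head_dropWhile _ _ _ h; simp_all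
          have ht' : (ds.dropWhile (· = c)).head? ≠ some c := by
            intro h; have := pv_head_dropWhile _ _ _ h; simp_all
          have hrw : pvListA (c :: cs) (c :: ds) prev
              = pvListA (List.replicate (1 + (cs.takeWhile (· = c)).length) c ++ cs.dropWhile (· = c))
                  (List.replicate (1 + (ds.takeWhile (· = c)).length) c ++ ds.dropWhile (· = c)) prev := by
            rw [← pv_run_decomp, ← pv_run_decomp]
          rw [hrw, pvListA_run c _ _ _ _ prev ho' ht' (by omega) (by omega)]
          have hrec := pvListA_eq_runCheck (ds.dropWhile (· = c)) (cs.dropWhile (· = c)) (some c)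
            (by intro e he hpe
                have := pv_head_dropWhile _ _ _ he
                simp at hpe this
                exact this (by rw [hpe]))
          simp [pvRunCheck, hrec]
        · have h1 : prev ≠ some d := hsafe d rfl
          simp [pvListA, pvRunCheck, hcd, h1]
termination_by t.length
decreasing_by
  simp only [List.length_cons]
  exact Nat.lt_succ_of_le (List.length_dropWhile_le _ _)

theorem pvCheck_rle_eq_runCheck (t o : List Char) :
    pvCheck (pvRle o) (pvRle t) = pvRunCheck o t := by
  match t with
  | [] =>
      match o with
      | [] => simp [pvCheck, pvRle, pvRunCheck]
      | c :: cs => simp [pvCheck, pvRle, pvRunCheck]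
  | d :: ds =>
      match o with
      | [] => simp [pvCheck, pvRle, pvRunCheck]
      | c :: cs =>
          have hrec := pvCheck_rle_eq_runCheck (ds.dropWhile (· = d)) (cs.dropWhile (· = c))
          by_cases hcd : c = d
          · subst hcd
            by_cases hk : 1 + (ds.takeWhile (· = c)).length < 1 + (cs.takeWhile (· = c)).length
            · have hle : ¬ (cs.takeWhile (· = c)).length ≤ (ds.takeWhile (· = c)).length := by omega
              simp only [pvCheck, pvRle, pvRunCheck]
              split <;> simp [hle]
            · have hle : (cs.takeWhile (· = c)).length ≤ (ds.takeWhile (· = c)).length := by omega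
              simp only [pvCheck, pvRle, pvRunCheck]
              rw [← hrec]
              by_cases hl : (pvRle (cs.dropWhile (· = c))).length = (pvRle (ds.dropWhile (· = c))).length
              · simp [pvCheck, hl, hle]
              · simp [pvCheck, hl]
          · simp [pvCheck, pvRle, pvRunCheck, hcd]
termination_by t.length
decreasing_by
  simp only [List.length_cons]
  exact Nat.lt_succ_of_le (List.length_dropWhile_le _ _)

-- one step of pvListA when the match branch cannot fire
theorem pvListA_step_nomatch (o : List Char) (i : Nat) (d : Char) (ds : List Char)
    (prev : Option Char) (hb1 : ¬ (i < o.length ∧ o[i]? = some d)) :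
    pvListA (o.drop i) (d :: ds) prev
      = if prev = some d then pvListA (o.drop i) ds (some d) else false := by
  cases h : o.drop i with
  | nil => simp [pvListA]
  | cons c cs =>
      have hio : i < o.length := by
        by_contra hle
        rw [List.drop_eq_nil_of_le (by omega)] at h
        simp at h
      have hc : c = o[i] := by
        have := List.drop_eq_getElem_cons hio (l := o)
        rw [h] at this
        exact (List.cons.injEq _ _ _ _ ▸ this).1
      have hcd : ¬ c = d := by
        intro he
        exact hb1 ⟨hio, by rw [List.getElem?_eq_getElem hio, ← hc, he]⟩
      simp [pvListA, hcd]

theorem pvLoopA_eq_listA (o t : List Char) (j i : Nat) (hi : i ≤ o.length) :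
    pvLoopA o t i j = pvListA (o.drop i) (t.drop j)
      (if j = 0 then none else t[j-1]?) := by
  rw [pvLoopA]
  by_cases hj : j < t.length
  · rw [dif_pos hj]
    have hdt : t.drop j = t[j] :: t.drop (j + 1) := List.drop_eq_getElem_cons hj
    have htj : t[j]? = some t[j] := List.getElem?_eq_getElem hj
    by_cases hb1 : i < o.length ∧ o[i]? = t[j]?
    · rw [if_pos hb1]
      obtain ⟨hio, hoi⟩ := hb1
      have hdo : o.drop i = o[i] :: o.drop (i + 1) := List.drop_eq_getElem_cons hio
      have hoe : o[i] = t[j] := by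
        rw [List.getElem?_eq_getElem hio, htj] at hoi
        exact Option.some.inj hoi
      rw [pvLoopA_eq_listA o t (j + 1) (i + 1) (by omega), hdt, hdo]
      simp [pvListA, hoe, htj]
    · rw [if_neg hb1]
      have hb1' : ¬ (i < o.length ∧ o[i]? = some t[j]) := by rw [← htj]; exact hb1
      by_cases hb2 : 0 < j ∧ t[j]? = t[j - 1]?
      · rw [if_pos hb2]
        obtain ⟨hj0, hprev⟩ := hb2
        have hpv : (if j = 0 then (none : Option Char) else t[j-1]?) = some t[j] := by
          rw [if_neg (by omega), ← hprev, htj]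
        rw [pvLoopA_eq_listA o t (j + 1) i hi, hdt, pvListA_step_nomatch o i _ _ _ hb1', hpv]
        simp [htj]
      · rw [if_neg hb2]
        have hpv : (if j = 0 then (none : Option Char) else t[j-1]?) ≠ some t[j] := by
          by_cases hj0 : j = 0
          · simp [hj0]
          · rw [if_neg hj0]
            intro he
            exact hb2 ⟨by omega, by rw [htj, he]⟩
        rw [hdt, pvListA_step_nomatch o i _ _ _ hb1', if_neg hpv]
  · rw [dif_neg hj]
    rw [List.drop_eq_nil_of_le (by omega : t.length ≤ j)]
    simp only [pvListA, List.drop_eq_nil_iff, decide_eq_decide]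
    omega
termination_by t.length - j

-- ===== VERDICT (by name: the statement is the Claim_ definition above) =====
theorem isLongPressed_spec : Claim_equal_isLongPressed := by
  intro original typed _
  unfold Spec_isLongPressed isLongPressed isLongPressed_alt
  rw [pvLoopA_eq_listA _ _ 0 0 (Nat.zero_le _)]
  simp only [List.drop_zero, if_true]
  rw [pvListA_eq_runCheck _ _ none (by simp), pvCheck_rle_eq_runCheck]
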